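-- pv_equiv track=rewrite | github.com/ariecattan/coref | utils.py | get_list_annotated_sentences
-- ===== SOURCE A (Python) =====
-- def get_list_annotated_sentences(annotated_sentences):
--     sentences = {}
--     for topic, doc, sentence in annotated_sentences:
--         if topic not in sentences:
--             sentences[topic] = {}
--         doc_name = topic + '_' + doc + '.xml'
--         if doc_name not in sentences[topic]:
--             sentences[topic][doc_name] = []
--         sentences[topic][doc_name].append(sentence)
--     return sentences
-- ===== SOURCE B (Python) =====
-- def get_list_annotated_sentences(annotated_sentences):
--     # Two-pass dedup-then-filter grouping instead of A's incremental nested-dict building.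
--     topics = list(dict.fromkeys(t for t, _, _ in annotated_sentences))
--
--     def doc_group(t):
--         entries = [(t + '_' + d + '.xml', s) for tt, d, s in annotated_sentences if tt == t]
--         docs = list(dict.fromkeys(n for n, _ in entries))
--         return {n: [s for m, s in entries if m == n] for n in docs}
--
--     return {t: doc_group(t) for t in topics}
-- ===== Notes on version B (the rewrite author's own statement) =====
-- stated objective: alternative
-- what changed: A builds the nested topic/doc dict incrementally in one pass with membership checks and in-place appends; B first dedups the topic keys, then for each topic filters the matching entries, dedups their doc names and builds each inner dict by filtering again (dedup-then-filter comprehensions instead of incremental dict mutation).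
import Mathlib
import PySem

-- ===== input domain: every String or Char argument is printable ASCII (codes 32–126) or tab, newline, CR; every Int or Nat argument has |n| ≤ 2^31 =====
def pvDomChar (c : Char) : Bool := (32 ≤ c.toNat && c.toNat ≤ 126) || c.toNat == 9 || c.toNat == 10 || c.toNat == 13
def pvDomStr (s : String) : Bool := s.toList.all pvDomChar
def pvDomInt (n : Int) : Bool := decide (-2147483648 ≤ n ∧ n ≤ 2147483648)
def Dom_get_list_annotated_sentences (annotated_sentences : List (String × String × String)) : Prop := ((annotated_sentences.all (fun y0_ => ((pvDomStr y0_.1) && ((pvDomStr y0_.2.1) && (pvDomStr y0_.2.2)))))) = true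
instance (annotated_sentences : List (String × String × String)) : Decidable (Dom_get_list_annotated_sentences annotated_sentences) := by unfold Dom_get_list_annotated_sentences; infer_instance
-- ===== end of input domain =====

-- B replaces A's incremental nested-dict grouping with a dedup-then-filter two-pass construction (alternative decomposition, same result).


-- ===== PORT A =====
-- loop body of A's for-loop (incremental nested-dict grouping), kept as a helper
def pvStepA (sentences : PySem.Dict String (PySem.Dict String (List String)))
    (x : String × String × String) : PySem.Dict String (PySem.Dict String (List String)) :=
  match x with
  | (topic, doc, sentence) =>
    let sentences := if sentences.contains topic then sentences
                     else sentences.insert topic PySem.Dict.empty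
    let doc_name := topic ++ "_" ++ doc ++ ".xml"
    let inner := sentences.getD topic PySem.Dict.empty
    let inner := if inner.contains doc_name then inner else inner.insert doc_name []
    let inner := inner.insert doc_name (inner.getD doc_name [] ++ [sentence])
    sentences.insert topic inner

def get_list_annotated_sentences (annotated_sentences : List (String × String × String)) :
    List (String × List (String × List String)) :=
  let sentences := annotated_sentences.foldl pvStepA PySem.Dict.empty
  sentences.items.map (fun p => (p.1, p.2.items))

-- ===== PORT B =====
def get_list_annotated_sentences_alt (annotated_sentences : List (String × String × String)) :
    List (String × List (String × List String)) :=
  let topics := PySem.List.dedup (annotated_sentences.map (fun x => x.1))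
  topics.map (fun t =>
    let entries := (annotated_sentences.filter (fun x => x.1 == t)).map
        (fun x => (t ++ "_" ++ x.2.1 ++ ".xml", x.2.2))
    let docs := PySem.List.dedup (entries.map (fun e => e.1))
    (t, docs.map (fun n => (n, (entries.filter (fun e => e.1 == n)).map (fun e => e.2)))))

-- ===== PRECONDITION & SPEC =====
def Spec_get_list_annotated_sentences (annotated_sentences : List (String × String × String)) (out : List (String × List (String × List String))) : Prop := out = get_list_annotated_sentences_alt annotated_sentences
instance (annotated_sentences : List (String × String × String)) (out : List (String × List (String × List String))) : Decidable (Spec_get_list_annotated_sentences annotated_sentences out) := by unfold Spec_get_list_annotated_sentences; infer_instance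

-- ===== CLAIM (what is proved, stated in full; the proofs are below) =====
def Claim_equal_get_list_annotated_sentences : Prop := ∀ (annotated_sentences : List (String × String × String)), Dom_get_list_annotated_sentences annotated_sentences → Spec_get_list_annotated_sentences annotated_sentences (get_list_annotated_sentences annotated_sentences)

-- ===== LEMMAS AND PROOFS =====

-- helper abbreviation used only in the proofs
def pvDn (x : String × String × String) : String := x.1 ++ "_" ++ x.2.1 ++ ".xml"

-- A's composite "ensure key exists, look up, write back" step is one Dict.modify
theorem pv_stepA_eq (d : PySem.Dict String (PySem.Dict String (List String)))
    (x : String × String × String) :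
    pvStepA d x = d.modify x.1 PySem.Dict.empty
      (fun inner => inner.modify (pvDn x) [] (fun v => v ++ [x.2.2])) := by
  obtain ⟨topic, doc, s⟩ := x
  simp only [pvStepA, pvDn, PySem.Dict.modify]
  split_ifs with h1 h2 h3 <;>
    simp_all [PySem.Dict.getD_insert_self, PySem.Dict.insert_insert_self,
      PySem.Dict.getD_of_not_contains]

-- getD through a fold of keyed modifies = fold over the elements whose key matches
theorem pv_getD_foldl_modify_key {alpha kappa nu : Type} [BEq kappa] [LawfulBEq kappa]
    [DecidableEq kappa]
    (l : List alpha) (key : alpha → kappa) (f : alpha → nu → nu) (d0 : nu)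
    (d : PySem.Dict kappa nu) (t : kappa) :
    (l.foldl (fun d x => d.modify (key x) d0 (f x)) d).getD t d0
      = (l.filter (fun x => key x == t)).foldl (fun v x => f x v) (d.getD t d0) := by
  induction l generalizing d with
  | nil => rfl
  | cons x l ih =>
    rw [List.foldl_cons, ih, PySem.Dict.getD_modify, List.filter_cons]
    by_cases h : key x = t
    · simp [h]
    · simp [h, Ne.symm h]

-- the inner (per-topic) dict, as an association list
theorem pv_inner_eq (ys : List (String × String × String)) :
    (ys.foldl (fun inner x => PySem.Dict.modify inner (pvDn x) [] (fun v => v ++ [x.2.2]))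
        PySem.Dict.empty).items
      = (PySem.Set.ofList (ys.map pvDn)).map
          (fun n => (n, (ys.filter (fun x => pvDn x == n)).map (fun x => x.2.2))) := by
  have hnd : (ys.foldl (fun inner x => PySem.Dict.modify inner (pvDn x) [] (fun v => v ++ [x.2.2]))
      PySem.Dict.empty).keys.Nodup :=
    PySem.Dict.nodup_keys_foldl_modify_key ys pvDn [] (fun _ x v => v ++ [x.2.2])
      PySem.Dict.empty PySem.Dict.nodup_keys_empty
  rw [PySem.Dict.items_eq_map_keys _ hnd [], PySem.Dict.keys_foldl_modify_key,
    PySem.Dict.keys_empty, PySem.Set.update_nil_left]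
  apply List.map_congr_left
  intro n _
  rw [pv_getD_foldl_modify_key, PySem.Dict.getD_empty,
    PySem.List.foldl_append_singleton_eq_map]
  rfl

-- ===== VERDICT (by name: the statement is the Claim_ definition above) =====
theorem get_list_annotated_sentences_spec : Claim_equal_get_list_annotated_sentences := by
  intro xs _
  show get_list_annotated_sentences xs = get_list_annotated_sentences_alt xs
  simp only [get_list_annotated_sentences, get_list_annotated_sentences_alt, PySem.List.dedup]
  have hstep : pvStepA = fun d x => PySem.Dict.modify d x.1 PySem.Dict.empty
      (fun inner => inner.modify (pvDn x) [] (fun v => v ++ [x.2.2])) := by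
    funext d x; exact pv_stepA_eq d x
  rw [hstep]
  have hnd : (xs.foldl (fun d x => PySem.Dict.modify d x.1 PySem.Dict.empty
      (fun inner => inner.modify (pvDn x) [] (fun v => v ++ [x.2.2])))
        PySem.Dict.empty).keys.Nodup :=
    PySem.Dict.nodup_keys_foldl_modify_key xs (fun x => x.1) PySem.Dict.empty
      (fun _ x inner => inner.modify (pvDn x) [] (fun v => v ++ [x.2.2]))
      PySem.Dict.empty PySem.Dict.nodup_keys_empty
  rw [PySem.Dict.items_eq_map_keys _ hnd PySem.Dict.empty,
    PySem.Dict.keys_foldl_modify_key, PySem.Dict.keys_empty, PySem.Set.update_nil_left,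
    List.map_map]
  apply List.map_congr_left
  intro t _
  simp only [Function.comp]
  rw [pv_getD_foldl_modify_key xs (fun x => x.1)
    (fun x => fun inner => PySem.Dict.modify inner (pvDn x) [] (fun v => v ++ [x.2.2]))
    PySem.Dict.empty, PySem.Dict.getD_empty]
  have hent : (xs.filter (fun x => x.1 == t)).map
        (fun x => (t ++ "_" ++ x.2.1 ++ ".xml", x.2.2))
      = (xs.filter (fun x => x.1 == t)).map (fun x => (pvDn x, x.2.2)) := by
    apply List.map_congr_left
    intro x hx
    have hx1 : x.1 = t := by simpa using List.of_mem_filter hx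
    simp [pvDn, hx1]
  rw [hent]
  have hfold : (xs.filter (fun x => x.1 == t)).foldl
      (fun v x => (fun x => fun inner => PySem.Dict.modify inner (pvDn x) [] (fun v => v ++ [x.2.2])) x v)
      PySem.Dict.empty
      = (xs.filter (fun x => x.1 == t)).foldl
        (fun inner x => PySem.Dict.modify inner (pvDn x) [] (fun v => v ++ [x.2.2]))
        PySem.Dict.empty := rfl
  rw [hfold, pv_inner_eq]
  simp [List.map_map, List.filter_map, Function.comp_def]
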